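-- pv_equiv track=rewrite | github.com/leesangmin4533/bgf-dashboard | scripts/food_order_evaluation_v4.py | estimate_initial_stock
-- ===== SOURCE A (Python) =====
-- def estimate_initial_stock(daily_entries):
--     running = 0
--     min_running = 0
--     for e in daily_entries:
--         running += (e.get("buy_qty", 0) or 0)
--         running -= (e.get("sale_qty", 0) or 0)
--         running -= (e.get("disuse_qty", 0) or 0)
--         min_running = min(min_running, running)
--     return abs(min_running) if min_running < 0 else 0
-- ===== SOURCE B (Python) =====
-- def estimate_initial_stock(daily_entries):
--     # Backward pass: the stock needed before the remaining days satisfies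
--     # need = max(0, need_after - delta_of_this_day); no running balance or
--     # minimum tracking is kept at all.
--     need = 0
--     for e in reversed(daily_entries):
--         delta = (e.get("buy_qty", 0) or 0) \
--             - (e.get("sale_qty", 0) or 0) \
--             - (e.get("disuse_qty", 0) or 0)
--         need = max(0, need - delta)
--     return need
-- ===== Notes on version B (the rewrite author's own statement) =====
-- stated objective: alternative
-- what changed: Replaces A's forward scan that maintains a running balance and its minimum (then abs/branch) by a backward pass over reversed(entries) computing the required initial stock directly with the recurrence need = max(0, need - delta), keeping no balance and no minimum.
import Mathlib
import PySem

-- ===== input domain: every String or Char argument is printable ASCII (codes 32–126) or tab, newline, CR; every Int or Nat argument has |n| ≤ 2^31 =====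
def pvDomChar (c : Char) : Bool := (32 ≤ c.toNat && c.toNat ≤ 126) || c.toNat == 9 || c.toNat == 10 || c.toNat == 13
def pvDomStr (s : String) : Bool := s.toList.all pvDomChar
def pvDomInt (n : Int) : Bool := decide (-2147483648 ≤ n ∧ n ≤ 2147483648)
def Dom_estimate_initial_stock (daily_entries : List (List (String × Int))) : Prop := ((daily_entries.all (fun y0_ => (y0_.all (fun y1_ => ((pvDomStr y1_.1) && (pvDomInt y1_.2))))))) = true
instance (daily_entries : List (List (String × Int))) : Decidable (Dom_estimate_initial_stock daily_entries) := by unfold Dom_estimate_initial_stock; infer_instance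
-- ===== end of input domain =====

-- B replaces A's forward running-balance/min-tracking scan by a backward pass over the
-- reversed entries computing the required initial stock via need = max(0, need - delta).
-- Note: `(… or 0)` on an Int value is the identity (0 is the only falsy Int and `0 or 0 == 0`),
-- so both ports use the association-list lookup with default 0 directly; exact under the
-- dict[str,int] type convention.

-- e.get(k, 0) on the association-list encoding of a Python dict (first match); used by both ports.
def pvGet (e : List (String × Int)) (k : String) : Int := (e.lookup k).getD 0

-- ===== PORT A =====
def estimate_initial_stock (daily_entries : List (List (String × Int))) : Int :=
  let s := daily_entries.foldl (fun (st : Int × Int) e =>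
    let running := st.1 + pvGet e "buy_qty"
    let running := running - pvGet e "sale_qty"
    let running := running - pvGet e "disuse_qty"
    (running, min st.2 running)) (0, 0)
  if s.2 < 0 then |s.2| else 0

-- ===== PORT B =====
-- Source B's loop over reversed(daily_entries) with the single `need` accumulator.
def estimate_initial_stock_alt (daily_entries : List (List (String × Int))) : Int :=
  daily_entries.reverse.foldl (fun need e =>
    let delta := pvGet e "buy_qty" - pvGet e "sale_qty" - pvGet e "disuse_qty"
    max 0 (need - delta)) 0

-- ===== PRECONDITION & SPEC =====
def Spec_estimate_initial_stock (daily_entries : List (List (String × Int))) (out : Int) : Prop := out = estimate_initial_stock_alt daily_entries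
instance (daily_entries : List (List (String × Int))) (out : Int) : Decidable (Spec_estimate_initial_stock daily_entries out) := by unfold Spec_estimate_initial_stock; infer_instance

-- ===== CLAIM (what is proved, stated in full; the proofs are below) =====
def Claim_equal_estimate_initial_stock : Prop := ∀ (daily_entries : List (List (String × Int))), Dom_estimate_initial_stock daily_entries → Spec_estimate_initial_stock daily_entries (estimate_initial_stock daily_entries)

-- ===== LEMMAS AND PROOFS =====

-- proof-only abbreviation for the per-entry delta
def pvD (e : List (String × Int)) : Int :=
  pvGet e "buy_qty" - pvGet e "sale_qty" - pvGet e "disuse_qty"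

-- minimum over all prefix sums of the deltas, including the empty prefix (hence ≤ 0)
def pvMinp : List (List (String × Int)) → Int
  | [] => 0
  | e :: t => min 0 (pvD e + pvMinp t)

theorem pvMinp_nonpos (es : List (List (String × Int))) : pvMinp es ≤ 0 := by
  cases es <;> simp [pvMinp]

-- A's loop from state (r, m) with m ≤ r ends with min-component min m (r + pvMinp es)
theorem loopA_min (es : List (List (String × Int))) (r m : Int) (h : m ≤ r) :
    (es.foldl (fun (st : Int × Int) e =>
      let running := st.1 + pvGet e "buy_qty"
      let running := running - pvGet e "sale_qty"
      let running := running - pvGet e "disuse_qty"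
      (running, min st.2 running)) (r, m)).2
    = min m (r + pvMinp es) := by
  induction es generalizing r m with
  | nil => simpa [pvMinp] using (min_eq_left h).symm
  | cons e t ih =>
    simp only [List.foldl_cons]
    rw [ih (r + pvGet e "buy_qty" - pvGet e "sale_qty" - pvGet e "disuse_qty")
        (min m _) (min_le_right _ _)]
    have hp := pvMinp_nonpos t
    simp only [pvMinp, pvD]
    omega

-- B's backward loop computes the negated (nonpositive) min prefix sum
theorem loopB_eq (es : List (List (String × Int))) :
    estimate_initial_stock_alt es = -pvMinp es := by
  unfold estimate_initial_stock_alt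
  rw [List.foldl_reverse]
  induction es with
  | nil => simp [pvMinp]
  | cons e t ih =>
    simp only [List.foldr_cons, ih, pvMinp, pvD]
    omega

-- ===== VERDICT (by name: the statement is the Claim_ definition above) =====
theorem estimate_initial_stock_spec : Claim_equal_estimate_initial_stock := by
  intro des _
  unfold Spec_estimate_initial_stock
  simp only [estimate_initial_stock]
  rw [loopA_min des 0 0 le_rfl, loopB_eq]
  have hp := pvMinp_nonpos des
  rcases lt_or_ge (pvMinp des) 0 with hlt | hge
  · simp only [zero_add, min_eq_right (le_of_lt hlt), if_pos hlt, abs_of_neg hlt]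
  · have h0 : pvMinp des = 0 := le_antisymm hp hge
    simp [h0]
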